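-- pv_equiv track=rewrite | github.com/CityofToronto/data-sources | volumes/miovision/api/csv_scripts/miov_bulk_postprocessor.py | dayrange
-- ===== SOURCE A (Python) =====
-- import math
--
-- def dayrange(start_time, end_time, dt):
--     """Generator for a sequence of regular time periods, with a shorter last
--     period if dt does not divide evenly into end_time - start_time."""
--     n_periods = math.ceil((end_time - start_time) / dt)
--     for i in range(n_periods):
--         c_start_t = start_time + i * dt
--         if i + 1 == n_periods:
--             yield (c_start_t, end_time)
--         else:
--             yield (c_start_t, c_start_t + dt)
-- ===== SOURCE B (Python) =====
-- def dayrange(start_time, end_time, dt):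
--     """Direct accumulation: march t from start_time by dt toward end_time,
--     clamping each interval's endpoint with min/max; no period count and no
--     division at all."""
--     t = start_time
--     if dt > 0:
--         while t < end_time:
--             yield (t, min(t + dt, end_time))
--             t += dt
--     elif dt < 0:
--         while t > end_time:
--             yield (t, max(t + dt, end_time))
--             t += dt
-- ===== Notes on version B (the rewrite author's own statement) =====
-- stated objective: alternative
-- what changed: Replaces A's counted loop over n_periods = ceil((end-start)/dt) with a direct while-style march of t by dt toward end_time, clamping each endpoint with min/max; B performs no division and never computes a period count.
import Mathlib
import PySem

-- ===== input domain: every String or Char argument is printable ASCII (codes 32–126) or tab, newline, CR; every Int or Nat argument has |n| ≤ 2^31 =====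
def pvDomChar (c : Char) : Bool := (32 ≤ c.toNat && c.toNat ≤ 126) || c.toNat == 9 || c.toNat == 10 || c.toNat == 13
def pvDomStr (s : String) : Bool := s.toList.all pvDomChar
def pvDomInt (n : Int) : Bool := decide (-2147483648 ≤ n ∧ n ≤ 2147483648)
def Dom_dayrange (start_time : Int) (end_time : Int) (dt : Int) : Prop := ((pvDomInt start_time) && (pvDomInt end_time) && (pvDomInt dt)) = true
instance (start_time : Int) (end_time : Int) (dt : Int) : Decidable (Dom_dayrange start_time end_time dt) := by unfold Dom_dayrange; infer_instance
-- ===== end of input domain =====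

-- B replaces A's counted loop over ceil((end-start)/dt) periods by a direct march of t
-- toward end_time, clamping endpoints with min/max and using no division (objective:
-- alternative algorithm). Both Pythons are generators; equivalence is about the yielded
-- sequence. Port A models math.ceil((end_time - start_time) / dt) on int arguments as the
-- exact ceiling division -((-(e-s)) // dt); on Dom_dayrange (|n| ≤ 2^31) the float
-- quotient's ceiling equals the exact rational ceiling, so this is exact there.

-- ===== PORT A =====
def dayrange (start_time : Int) (end_time : Int) (dt : Int) : List (Int × Int) :=
  let n_periods : Int := -(PySem.Int.floordiv (-(end_time - start_time)) dt)
  (PySem.List.pyRange 0 n_periods 1).foldl (fun acc i =>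
    let c_start_t := start_time + i * dt
    acc ++ [if i + 1 = n_periods then (c_start_t, end_time) else (c_start_t, c_start_t + dt)]) []

-- ===== PORT B =====
-- the `while t < end_time` loop of Source B (dt > 0 branch)
def pvMarchUp (e dt t : Int) : List (Int × Int) :=
  if h : 0 < dt ∧ t < e then (t, min (t + dt) e) :: pvMarchUp e dt (t + dt) else []
termination_by (e - t).toNat
decreasing_by omega

-- the `while t > end_time` loop of Source B (dt < 0 branch)
def pvMarchDown (e dt t : Int) : List (Int × Int) :=
  if h : dt < 0 ∧ e < t then (t, max (t + dt) e) :: pvMarchDown e dt (t + dt) else []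
termination_by (t - e).toNat
decreasing_by omega

def dayrange_alt (start_time : Int) (end_time : Int) (dt : Int) : List (Int × Int) :=
  if 0 < dt then pvMarchUp end_time dt start_time
  else if dt < 0 then pvMarchDown end_time dt start_time
  else []

-- ===== PRECONDITION & SPEC =====
-- Pre_ excludes only dt = 0, on which Python A raises ZeroDivisionError.
def Pre_dayrange (start_time : Int) (end_time : Int) (dt : Int) : Prop := dt ≠ 0
instance (start_time : Int) (end_time : Int) (dt : Int) : Decidable (Pre_dayrange start_time end_time dt) := by unfold Pre_dayrange; infer_instance
def pvWitness_dayrange : Int × Int × Int := (0, 10, 3)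

def Spec_dayrange (start_time : Int) (end_time : Int) (dt : Int) (out : List (Int × Int)) : Prop := out = dayrange_alt start_time end_time dt
instance (start_time : Int) (end_time : Int) (dt : Int) (out : List (Int × Int)) : Decidable (Spec_dayrange start_time end_time dt out) := by unfold Spec_dayrange; infer_instance

-- ===== CLAIM (what is proved, stated in full; the proofs are below) =====
def Claim_equal_dayrange : Prop := ∀ (start_time : Int) (end_time : Int) (dt : Int), Dom_dayrange start_time end_time dt → Pre_dayrange start_time end_time dt → Spec_dayrange start_time end_time dt (dayrange start_time end_time dt)

-- ===== LEMMAS AND PROOFS =====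

/-- The upward march produces exactly `k` intervals when `k` satisfies the ceiling
bracket `((k:Int)-1)*dt < e - t ≤ (k:Int)*dt`. -/
lemma pvMarchUp_eq (e dt : Int) (hdt : 0 < dt) :
    ∀ (k : Nat) (t : Int), e - t ≤ (k : Int) * dt → ((k : Int) - 1) * dt < e - t →
      pvMarchUp e dt t
        = (List.range k).map (fun (i : Nat) =>
            ((t + (i : Int) * dt, if i + 1 = k then e else t + ((i : Int) + 1) * dt) : Int × Int)) := by
  intro k
  induction k with
  | zero =>
    intro t hub _
    rw [pvMarchUp]
    simp only [Nat.cast_zero, zero_mul] at hub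
    have h : ¬ (0 < dt ∧ t < e) := by omega
    simp [h]
  | succ k ih =>
    intro t hub hlb
    have hklb : (0 : Int) ≤ (k : Int) * dt := by positivity
    have ht : t < e := by push_cast at hlb; nlinarith
    rw [pvMarchUp, dif_pos ⟨hdt, ht⟩, List.range_succ_eq_map]
    simp only [List.map_cons, List.map_map]
    congr 1
    · -- head interval
      rcases Nat.eq_zero_or_pos k with hk0 | hkpos
      · subst hk0
        push_cast at hub
        have hmin : e ≤ t + dt := by linarith
        simp [min_eq_right hmin]
      · have hk1 : (1 : Int) ≤ (k : Int) := by exact_mod_cast hkpos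
        have hlt : t + dt < e := by push_cast at hlb; nlinarith
        have hne : ¬ ((0 : Nat) + 1 = k + 1) := by omega
        rw [if_neg hne, min_eq_left (le_of_lt hlt)]
        push_cast
        simp
    · -- tail
      have hub' : e - (t + dt) ≤ (k : Int) * dt := by push_cast at hub; linarith
      have hlb' : ((k : Int) - 1) * dt < e - (t + dt) := by push_cast at hlb; nlinarith
      rw [ih (t + dt) hub' hlb']
      apply List.map_congr_left
      intro i _
      simp only [Function.comp]
      by_cases h : i + 1 = k
      · have h2 : i + 1 + 1 = k + 1 := by omega
        simp only [h, if_true, h2, Prod.mk.injEq, and_true]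
        push_cast; ring
      · have h2 : ¬ (i + 1 + 1 = k + 1) := by omega
        simp only [h, if_false, h2, Prod.mk.injEq]
        constructor <;> (push_cast; ring)

/-- The downward march, mirror of `pvMarchUp_eq`. -/
lemma pvMarchDown_eq (e dt : Int) (hdt : dt < 0) :
    ∀ (k : Nat) (t : Int), (k : Int) * dt ≤ e - t → e - t < ((k : Int) - 1) * dt →
      pvMarchDown e dt t
        = (List.range k).map (fun (i : Nat) =>
            ((t + (i : Int) * dt, if i + 1 = k then e else t + ((i : Int) + 1) * dt) : Int × Int)) := by
  intro k
  induction k with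
  | zero =>
    intro t hub _
    rw [pvMarchDown]
    simp only [Nat.cast_zero, zero_mul] at hub
    have h : ¬ (dt < 0 ∧ e < t) := by omega
    simp [h]
  | succ k ih =>
    intro t hub hlb
    have hk0 : (0 : Int) ≤ (k : Int) := by positivity
    have hkub : (k : Int) * dt ≤ 0 := by nlinarith
    have ht : e < t := by push_cast at hlb; nlinarith
    rw [pvMarchDown, dif_pos ⟨hdt, ht⟩, List.range_succ_eq_map]
    simp only [List.map_cons, List.map_map]
    congr 1
    · rcases Nat.eq_zero_or_pos k with hkz | hkpos
      · subst hkz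
        push_cast at hub
        have hmax : t + dt ≤ e := by linarith
        simp [max_eq_right hmax]
      · have hk1 : (1 : Int) ≤ (k : Int) := by exact_mod_cast hkpos
        have hgt : e < t + dt := by push_cast at hlb; nlinarith
        have hne : ¬ ((0 : Nat) + 1 = k + 1) := by omega
        rw [if_neg hne, max_eq_left (le_of_lt hgt)]
        push_cast
        simp
    · have hub' : (k : Int) * dt ≤ e - (t + dt) := by push_cast at hub; linarith
      have hlb' : e - (t + dt) < ((k : Int) - 1) * dt := by push_cast at hlb; nlinarith
      rw [ih (t + dt) hub' hlb']
      apply List.map_congr_left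
      intro i _
      simp only [Function.comp]
      by_cases h : i + 1 = k
      · have h2 : i + 1 + 1 = k + 1 := by omega
        simp only [h, if_true, h2, Prod.mk.injEq, and_true]
        push_cast; ring
      · have h2 : ¬ (i + 1 + 1 = k + 1) := by omega
        simp only [h, if_false, h2, Prod.mk.injEq]
        constructor <;> (push_cast; ring)

theorem dayrange_eq (s e dt : Int) (hdt : dt ≠ 0) : dayrange s e dt = dayrange_alt s e dt := by
  unfold dayrange dayrange_alt
  dsimp only
  set n : Int := -(PySem.Int.floordiv (-(e - s)) dt) with hn
  rw [PySem.List.foldl_append_singleton_eq_map, PySem.List.pyRange_one]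
  simp only [sub_zero]
  rcases lt_trichotomy dt 0 with hneg | hzero | hpos
  · -- dt < 0
    have harg : -(e - s) = s - e := by ring
    have hb : -(PySem.Int.floordiv (-(s - e)) (-dt)) = n := by
      rw [PySem.Int.floordiv_neg_neg, hn, harg]
    have hbr := (PySem.Int.neg_floordiv_neg_eq_iff_of_pos (a := s - e) (b := -dt)
      (q := n) (by omega)).mp hb
    -- hbr : (n - 1) * (-dt) < s - e ∧ s - e ≤ n * (-dt)
    have hub : n * dt ≤ e - s := by nlinarith [hbr.2]
    have hlb : e - s < (n - 1) * dt := by nlinarith [hbr.1]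
    have h1 : ¬ (0 < dt) := by omega
    simp only [h1, if_false, hneg, if_true]
    rcases le_or_gt n 0 with hn0 | hnpos
    · have hk : n.toNat = 0 := by omega
      have hge : (0 : Int) ≤ e - s := by nlinarith
      have het : ¬ (dt < 0 ∧ e < s) := by omega
      rw [pvMarchDown]
      simp [hk, het]
    · have hkn : ((n.toNat : Int)) = n := by omega
      rw [pvMarchDown_eq e dt hneg n.toNat s (by rw [hkn]; exact hub) (by rw [hkn]; exact hlb)]
      simp only [List.nil_append, List.map_map]
      apply List.map_congr_left
      intro i hi
      have hi' : i < n.toNat := List.mem_range.mp hi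
      simp only [Function.comp, zero_add]
      have hcond : ((i : Int) + 1 = n) ↔ (i + 1 = n.toNat) := by omega
      by_cases h : i + 1 = n.toNat
      · simp [hcond.mpr h, h]
      · have h2 : ¬ ((i : Int) + 1 = n) := fun hx => h (hcond.mp hx)
        simp only [h2, if_false, h, Prod.mk.injEq, true_and]
        ring
  · exact absurd hzero hdt
  · -- dt > 0
    have hb : -(PySem.Int.floordiv (-(e - s)) dt) = n := hn.symm
    have hbr := (PySem.Int.neg_floordiv_neg_eq_iff_of_pos (a := e - s) (b := dt)
      (q := n) hpos).mp hb
    -- hbr : (n - 1) * dt < e - s ∧ e - s ≤ n * dt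
    simp only [hpos, if_true]
    rcases le_or_gt n 0 with hn0 | hnpos
    · have hk : n.toNat = 0 := by omega
      have hle : e - s ≤ 0 := by nlinarith [hbr.2]
      have het : ¬ (0 < dt ∧ s < e) := by omega
      rw [pvMarchUp]
      simp [hk, het]
    · have hkn : ((n.toNat : Int)) = n := by omega
      rw [pvMarchUp_eq e dt hpos n.toNat s (by rw [hkn]; exact hbr.2) (by rw [hkn]; exact hbr.1)]
      simp only [List.nil_append, List.map_map]
      apply List.map_congr_left
      intro i hi
      have hi' : i < n.toNat := List.mem_range.mp hi
      simp only [Function.comp, zero_add]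
      have hcond : ((i : Int) + 1 = n) ↔ (i + 1 = n.toNat) := by omega
      by_cases h : i + 1 = n.toNat
      · simp [hcond.mpr h, h]
      · have h2 : ¬ ((i : Int) + 1 = n) := fun hx => h (hcond.mp hx)
        simp only [h2, if_false, h, Prod.mk.injEq, true_and]
        ring

-- ===== VERDICT (by name: the statement is the Claim_ definition above) =====
theorem dayrange_spec : Claim_equal_dayrange := by
  intro s e dt _ hpre
  exact dayrange_eq s e dt hpre
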